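-- pv_equiv track=rewrite | github.com/ilTrabba/Mangrove | model_heritage_backend/src/utils/cypher_validator.py | _split_return_items
-- ===== SOURCE A (Python) =====
-- def _split_return_items(return_clause: str) -> list:
--     """
--     Split RETURN clause items by comma, handling nested parentheses.
--     """
--     items = []
--     current_item = ""
--     paren_depth = 0
--     bracket_depth = 0
--
--     for char in return_clause:
--         if char == '(':
--             paren_depth += 1
--         elif char == ')':
--             paren_depth -= 1
--         elif char == '[':
--             bracket_depth += 1
--         elif char == ']':
--             bracket_depth -= 1
--         elif char == ',' and paren_depth == 0 and bracket_depth == 0: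
--             items.append(current_item. strip())
--             current_item = ""
--             continue
--
--         current_item += char
--
--     if current_item. strip():
--         items.append(current_item.strip())
--
--     return items
-- ===== SOURCE B (Python) =====
-- def _split_return_items(return_clause: str) -> list:
--     # Two passes: collect indices of top-level commas, then slice between them.
--     paren_depth = 0
--     bracket_depth = 0
--     cuts = []
--     for i, char in enumerate(return_clause):
--         if char == '(':
--             paren_depth += 1
--         elif char == ')':
--             paren_depth -= 1
--         elif char == '[':
--             bracket_depth += 1
--         elif char == ']':
--             bracket_depth -= 1
--         elif char == ',' and paren_depth == 0 and bracket_depth == 0: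
--             cuts.append(i)
--     items = []
--     start = 0
--     for pos in cuts:
--         items.append(return_clause[start:pos].strip())
--         start = pos + 1
--     last = return_clause[start:].strip()
--     if last:
--         items.append(last)
--     return items
-- ===== Notes on version B (the rewrite author's own statement) =====
-- stated objective: alternative
-- what changed: Replaced A's char-by-char accumulator loop with two passes: one pass collecting indices of commas at zero paren/bracket depth, then a slicing pass that strips each s[start:pos] segment and the tail.
import Mathlib
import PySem

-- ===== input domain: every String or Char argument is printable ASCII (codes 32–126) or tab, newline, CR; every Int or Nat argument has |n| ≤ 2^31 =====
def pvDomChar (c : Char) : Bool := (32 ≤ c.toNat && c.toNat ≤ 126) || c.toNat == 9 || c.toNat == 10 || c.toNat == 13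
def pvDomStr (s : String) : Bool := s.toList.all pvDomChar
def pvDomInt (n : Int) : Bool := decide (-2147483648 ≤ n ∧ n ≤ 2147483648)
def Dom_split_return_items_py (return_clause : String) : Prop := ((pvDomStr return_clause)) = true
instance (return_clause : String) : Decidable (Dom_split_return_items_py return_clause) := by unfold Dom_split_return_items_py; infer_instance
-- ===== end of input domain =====

-- B replaces A's char-by-char accumulator with two passes — collect top-level comma indices, then slice — an alternative decomposition of the same cost.

-- ===== PORT A =====
-- A's single loop: items, current_item (as List Char), paren_depth, bracket_depth.
def pvLoopA : List Char → List String → List Char → Int → Int → List String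
  | [], items, cur, _, _ =>
      if PySem.Chars.strip cur ≠ [] then items ++ [String.ofList (PySem.Chars.strip cur)] else items
  | c :: cs, items, cur, pd, bd =>
      if c = '(' then pvLoopA cs items (cur ++ [c]) (pd + 1) bd
      else if c = ')' then pvLoopA cs items (cur ++ [c]) (pd - 1) bd
      else if c = '[' then pvLoopA cs items (cur ++ [c]) pd (bd + 1)
      else if c = ']' then pvLoopA cs items (cur ++ [c]) pd (bd - 1)
      else if c = ',' ∧ pd = 0 ∧ bd = 0 then
        pvLoopA cs (items ++ [String.ofList (PySem.Chars.strip cur)]) [] pd bd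
      else pvLoopA cs items (cur ++ [c]) pd bd

def split_return_items_py (return_clause : String) : List String :=
  pvLoopA return_clause.toList [] [] 0 0

-- ===== PORT B =====
-- B pass 1: indices of commas at depth (0,0) (enumerate loop).
def pvCuts : List Char → Nat → Int → Int → List Nat
  | [], _, _, _ => []
  | c :: cs, i, pd, bd =>
      if c = '(' then pvCuts cs (i + 1) (pd + 1) bd
      else if c = ')' then pvCuts cs (i + 1) (pd - 1) bd
      else if c = '[' then pvCuts cs (i + 1) pd (bd + 1)
      else if c = ']' then pvCuts cs (i + 1) pd (bd - 1)
      else if c = ',' ∧ pd = 0 ∧ bd = 0 then i :: pvCuts cs (i + 1) pd bd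
      else pvCuts cs (i + 1) pd bd

-- B pass 2: slice s[start:pos] per cut (s[a:b] = (drop a).take (b-a), PySem.List.slice_natCast), then the tail s[start:].
def pvSlices (s : List Char) : List Nat → List String → Nat → List String
  | [], items, start =>
      let last := PySem.Chars.strip (s.drop start)
      if last ≠ [] then items ++ [String.ofList last] else items
  | p :: ps, items, start =>
      pvSlices s ps (items ++ [String.ofList (PySem.Chars.strip ((s.drop start).take (p - start)))]) (p + 1)

def split_return_items_py_alt (return_clause : String) : List String :=
  pvSlices return_clause.toList (pvCuts return_clause.toList 0 0 0) [] 0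

-- ===== PRECONDITION & SPEC =====
def Spec_split_return_items_py (return_clause : String) (out : List String) : Prop := out = split_return_items_py_alt return_clause
instance (return_clause : String) (out : List String) : Decidable (Spec_split_return_items_py return_clause out) := by unfold Spec_split_return_items_py; infer_instance

-- ===== CLAIM (what is proved, stated in full; the proofs are below) =====
def Claim_equal_split_return_items_py : Prop := ∀ (return_clause : String), Dom_split_return_items_py return_clause → Spec_split_return_items_py return_clause (split_return_items_py return_clause)

-- ===== LEMMAS AND PROOFS =====

-- Invariant: A's current_item is exactly the slice s[start:i].
lemma pv_key : ∀ (cs s : List Char) (i start : Nat) (pd bd : Int) (items : List String),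
    s.drop i = cs → start ≤ i →
    pvLoopA cs items ((s.drop start).take (i - start)) pd bd
      = pvSlices s (pvCuts cs i pd bd) items start := by
  intro cs
  induction cs with
  | nil =>
    intro s i start pd bd items hdrop hle
    have hlen : s.length ≤ i := by
      by_contra h
      exact absurd hdrop (by simp [List.drop_eq_nil_iff]; omega)
    have htake : ((s.drop start).take (i - start)) = s.drop start := by
      apply List.take_of_length_le
      simp; omega
    simp [pvLoopA, pvCuts, pvSlices, htake]
  | cons c cs ih =>
    intro s i start pd bd items hdrop hle
    have hi : i < s.length := by
      by_contra h
      have : s.drop i = [] := by simp [List.drop_eq_nil_iff]; omega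
      simp [this] at hdrop
    have hget : s[i]? = some c := by
      have h0 : (s.drop i)[0]? = s[i + 0]? := List.getElem?_drop
      simp [hdrop] at h0
      simpa using h0.symm
    have hdrop' : s.drop (i + 1) = cs := by
      have : s.drop (i + 1) = (s.drop i).drop 1 := by
        rw [List.drop_drop]
      simp [this, hdrop]
    have hext : (s.drop start).take (i + 1 - start) = (s.drop start).take (i - start) ++ [c] := by
      have h1 : i + 1 - start = (i - start) + 1 := by omega
      have h2 : (s.drop start)[i - start]? = some c := by
        rw [List.getElem?_drop]
        have : start + (i - start) = i := by omega
        rw [this]; exact hget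
      rw [h1, List.take_add_one, h2]
      rfl
    have hempty : (s.drop (i + 1)).take ((i + 1) - (i + 1)) = [] := by simp
    simp only [pvLoopA, pvCuts]
    split_ifs with h1 h2 h3 h4 h5
    · rw [← hext]; exact ih s (i + 1) start (pd + 1) bd items hdrop' (by omega)
    · rw [← hext]; exact ih s (i + 1) start (pd - 1) bd items hdrop' (by omega)
    · rw [← hext]; exact ih s (i + 1) start pd (bd + 1) items hdrop' (by omega)
    · rw [← hext]; exact ih s (i + 1) start pd (bd - 1) items hdrop' (by omega)
    · simp only [pvSlices]
      have := ih s (i + 1) (i + 1) pd bd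
        (items ++ [String.ofList (PySem.Chars.strip ((s.drop start).take (i - start)))]) hdrop' (by omega)
      rw [← this, hempty]
    · rw [← hext]; exact ih s (i + 1) start pd bd items hdrop' (by omega)

-- ===== VERDICT (by name: the statement is the Claim_ definition above) =====
theorem split_return_items_py_spec : Claim_equal_split_return_items_py := by
  intro s _
  unfold Spec_split_return_items_py split_return_items_py split_return_items_py_alt
  have := pv_key s.toList s.toList 0 0 0 0 [] (by simp) (by omega)
  simpa using this
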